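-- pv_equiv track=rewrite | github.com/ruizguille/adventofcode | 2025/day10/main.py | min_ops_part1
-- ===== SOURCE A (Python) =====
-- def min_ops_part1(target, buttons):
--     n = len(buttons)
--     states = [(0, 0)]
--     for ops in range(1, n+1):
--         next_states = []
--         for val, next_idx in states:
--             for i in range(next_idx, n):
--                 next_val = val ^ buttons[i]
--                 if next_val == target:
--                     return ops
--                 next_states.append((next_val, i + 1))
--         states = next_states
-- ===== SOURCE B (Python) =====
-- def min_ops_part1(target, buttons):
--     return _best(target, buttons)
--
-- def _best(t, bs):
--     # minimal size of a nonempty selection of entries of bs (each position used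
--     # at most once) whose XOR equals t; None if impossible
--     if not bs:
--         return None
--     b, rest = bs[0], bs[1:]
--     skip = _best(t, rest)
--     if t == b:
--         take = 1
--     else:
--         sub = _best(t ^ b, rest)
--         take = None if sub is None else sub + 1
--     if skip is None:
--         return take
--     if take is None:
--         return skip
--     return min(skip, take)
-- ===== Notes on version B (the rewrite author's own statement) =====
-- stated objective: alternative
-- what changed: Replaces A's level-by-level breadth-first expansion of (xor-value, next-index) state lists with a direct take/skip structural recursion on the button list that returns the minimum count, combining branches with min.
import Mathlib
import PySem

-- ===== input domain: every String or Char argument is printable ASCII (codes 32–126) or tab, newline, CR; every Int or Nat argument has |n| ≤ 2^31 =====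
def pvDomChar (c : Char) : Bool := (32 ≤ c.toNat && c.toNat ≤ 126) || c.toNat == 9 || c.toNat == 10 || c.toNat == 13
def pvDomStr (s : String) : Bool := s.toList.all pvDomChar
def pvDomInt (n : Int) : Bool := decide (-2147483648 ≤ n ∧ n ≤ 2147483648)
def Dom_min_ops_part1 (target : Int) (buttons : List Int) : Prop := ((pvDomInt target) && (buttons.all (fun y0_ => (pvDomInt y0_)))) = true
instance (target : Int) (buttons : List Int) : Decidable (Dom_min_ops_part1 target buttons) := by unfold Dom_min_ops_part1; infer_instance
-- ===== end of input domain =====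

-- B replaces A's level-by-level breadth-first expansion of (xor value, next index)
-- state lists with a direct take/skip structural recursion on the button list
-- (objective: alternative algorithm of similar cost).

-- ===== PORT A =====
-- inner loop 'for i in range(next_idx, n)': 'none' = the early 'return ops' fired,
-- 'some l' = the states this state appends to next_states
def pvARow (target : Int) (buttons : List Int) (val : Int) : List Int → Option (List (Int × Int))
  | [] => some []
  | i :: rest =>
      let nextVal := PySem.Int.bxor val (PySem.List.pyGetD buttons i 0)
      if nextVal = target then none
      else
        match pvARow target buttons val rest with
        | none => none
        | some l => some ((nextVal, i + 1) :: l)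

-- middle loop 'for val, next_idx in states': 'none' = early return, 'some' = next_states
def pvALevel (target : Int) (buttons : List Int) : List (Int × Int) → Option (List (Int × Int))
  | [] => some []
  | (val, nextIdx) :: rest =>
      match pvARow target buttons val (PySem.List.pyRange nextIdx (buttons.length : Int) 1) with
      | none => none
      | some l =>
        match pvALevel target buttons rest with
        | none => none
        | some l' => some (l ++ l')

-- outer loop 'for ops in range(1, n+1)' (k = number of remaining iterations)
def pvALoop (target : Int) (buttons : List Int) : Nat → Int → List (Int × Int) → Option Int
  | 0, _, _ => none
  | k + 1, ops, states =>
      match pvALevel target buttons states with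
      | none => some ops
      | some next => pvALoop target buttons k (ops + 1) next

def min_ops_part1 (target : Int) (buttons : List Int) : Option Int :=
  pvALoop target buttons buttons.length 1 [(0, 0)]

-- ===== PORT B =====
-- _best in Source B: minimal size of a nonempty selection of entries of bs
-- (each position used at most once) whose XOR equals t; none if impossible
def pvBest (t : Int) : List Int → Option Int
  | [] => none
  | b :: rest =>
      let skip := pvBest t rest
      let take := if t = b then some 1
                  else
                    match pvBest (PySem.Int.bxor t b) rest with
                    | none => none
                    | some s => some (s + 1)
      match skip, take with
      | none, tk => tk
      | some s, none => some s
      | some s, some c => some (min s c)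

def min_ops_part1_alt (target : Int) (buttons : List Int) : Option Int :=
  pvBest target buttons

-- ===== PRECONDITION & SPEC =====
def Spec_min_ops_part1 (target : Int) (buttons : List Int) (out : Option Int) : Prop := out = min_ops_part1_alt target buttons
instance (target : Int) (buttons : List Int) (out : Option Int) : Decidable (Spec_min_ops_part1 target buttons out) := by unfold Spec_min_ops_part1; infer_instance

-- ===== CLAIM (what is proved, stated in full; the proofs are below) =====
def Claim_equal_min_ops_part1 : Prop := ∀ (target : Int) (buttons : List Int), Dom_min_ops_part1 target buttons → Spec_min_ops_part1 target buttons (min_ops_part1 target buttons)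

-- ===== LEMMAS AND PROOFS =====

theorem pvBxor_ofNat_ofNat (m n : Nat) : PySem.Int.bxor (Int.ofNat m) (Int.ofNat n) = Int.ofNat (m ^^^ n) := by
  simp [PySem.Int.bxor]
theorem pvBxor_ofNat_negSucc (m n : Nat) : PySem.Int.bxor (Int.ofNat m) (Int.negSucc n) = Int.negSucc (m ^^^ n) := by
  have h1 : ¬ (0:Int) ≤ Int.negSucc n := by omega
  simp [PySem.Int.bxor, h1]
  omega
theorem pvBxor_negSucc_ofNat (m n : Nat) : PySem.Int.bxor (Int.negSucc m) (Int.ofNat n) = Int.negSucc (m ^^^ n) := by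
  have h1 : ¬ (0:Int) ≤ Int.negSucc m := by omega
  simp [PySem.Int.bxor, h1]
  omega
theorem pvBxor_negSucc_negSucc (m n : Nat) : PySem.Int.bxor (Int.negSucc m) (Int.negSucc n) = Int.ofNat (m ^^^ n) := by
  have h1 : ¬ (0:Int) ≤ Int.negSucc m := by omega
  have h2 : ¬ (0:Int) ≤ Int.negSucc n := by omega
  have h3 : (-(Int.negSucc m) - 1).toNat = m := by omega
  have h4 : (-(Int.negSucc n) - 1).toNat = n := by omega
  simp [PySem.Int.bxor, h1, h2]
theorem pvBxor_assoc (a b c : Int) : PySem.Int.bxor (PySem.Int.bxor a b) c = PySem.Int.bxor a (PySem.Int.bxor b c) := by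
  rcases a with m | m <;> rcases b with n | n <;> rcases c with p | p <;>
    simp only [pvBxor_ofNat_ofNat, pvBxor_ofNat_negSucc, pvBxor_negSucc_ofNat, pvBxor_negSucc_negSucc, Nat.xor_assoc]

theorem pvBxor_zero_left (a : Int) : PySem.Int.bxor 0 a = a := by
  rw [PySem.Int.bxor_comm]; exact PySem.Int.bxor_zero a
theorem pvBxor_bxor_self (b t : Int) : PySem.Int.bxor b (PySem.Int.bxor b t) = t := by
  rw [← pvBxor_assoc, PySem.Int.bxor_self, pvBxor_zero_left]
def pvXorL (S : List Int) : Int := S.foldl PySem.Int.bxor 0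
theorem pvFoldl_bxor (S : List Int) (a : Int) : S.foldl PySem.Int.bxor a = PySem.Int.bxor a (pvXorL S) := by
  induction S generalizing a with
  | nil => simp [pvXorL, PySem.Int.bxor_zero]
  | cons b S ih =>
    simp only [pvXorL, List.foldl_cons, pvBxor_zero_left]
    rw [ih (PySem.Int.bxor a b), ih b, pvBxor_assoc]
theorem pvXorL_cons (b : Int) (S : List Int) : pvXorL (b :: S) = PySem.Int.bxor b (pvXorL S) := by
  show (b :: S).foldl PySem.Int.bxor 0 = _
  rw [List.foldl_cons, pvBxor_zero_left, pvFoldl_bxor]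
theorem pvXorL_concat (S : List Int) (x : Int) : pvXorL (S ++ [x]) = PySem.Int.bxor (pvXorL S) x := by
  show (S ++ [x]).foldl PySem.Int.bxor 0 = _
  rw [List.foldl_append]; rfl
def pvQ (t : Int) (bs : List Int) (k : Nat) : Prop :=
  ∃ S : List Int, S.Sublist bs ∧ S ≠ [] ∧ S.length = k ∧ pvXorL S = t
theorem pvQ_cons (t b : Int) (bs : List Int) (k : Nat) :
    pvQ t (b :: bs) k ↔ pvQ t bs k ∨ (k = 1 ∧ t = b) ∨ (∃ k', k = k' + 1 ∧ pvQ (PySem.Int.bxor t b) bs k') := by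
  constructor
  · rintro ⟨S, hsub, hne, hlen, hxor⟩
    rcases List.sublist_cons_iff.mp hsub with h | ⟨r, rfl, hr⟩
    · exact Or.inl ⟨S, h, hne, hlen, hxor⟩
    · rcases List.eq_nil_or_concat r with rfl | ⟨r', y, rfl⟩
      · refine Or.inr (Or.inl ⟨by simpa using hlen.symm, ?_⟩)
        rw [← hxor, pvXorL_cons]; simp [pvXorL, PySem.Int.bxor_zero]
      · refine Or.inr (Or.inr ⟨(r'.concat y).length, by simpa using hlen.symm, r'.concat y, hr, by simp, rfl, ?_⟩)
        rw [pvXorL_cons] at hxor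
        rw [← hxor, PySem.Int.bxor_comm _ b, pvBxor_bxor_self]
  · rintro (⟨S, hsub, hne, hlen, hxor⟩ | ⟨rfl, rfl⟩ | ⟨k', rfl, S, hsub, hne, hlen, hxor⟩)
    · exact ⟨S, hsub.cons _, hne, hlen, hxor⟩
    · exact ⟨[t], by simp [List.sublist_cons_iff], by simp, rfl, by simp [pvXorL, pvBxor_zero_left]⟩
    · refine ⟨b :: S, List.sublist_cons_iff.mpr (Or.inr ⟨S, rfl, hsub⟩), by simp, by simp [hlen], ?_⟩
      rw [pvXorL_cons, hxor, PySem.Int.bxor_comm t b, pvBxor_bxor_self]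
theorem pvQ_length {t : Int} {bs : List Int} {k : Nat} (h : pvQ t bs k) : 1 ≤ k ∧ k ≤ bs.length := by
  obtain ⟨S, hsub, hne, hlen, -⟩ := h
  have := hsub.length_le
  have : 0 < S.length := List.length_pos_of_ne_nil hne
  omega

theorem pvBest_char (t : Int) (bs : List Int) :
    (∀ k : Int, pvBest t bs = some k →
      1 ≤ k ∧ pvQ t bs k.toNat ∧ ∀ j : Nat, pvQ t bs j → k ≤ (j : Int)) ∧
    (pvBest t bs = none → ∀ j : Nat, ¬ pvQ t bs j) := by
  induction bs generalizing t with
  | nil =>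
    constructor
    · intro k hk; simp [pvBest] at hk
    · rintro - j ⟨S, hsub, hne, -, -⟩
      simp [List.sublist_nil] at hsub; exact hne hsub
  | cons b rest ih =>
    obtain ⟨ihS1, ihS2⟩ := ih t
    obtain ⟨ihT1, ihT2⟩ := ih (PySem.Int.bxor t b)
    constructor
    · intro k hk
      rcases hskip : pvBest t rest with - | s0
      · by_cases htb : t = b
        · simp only [pvBest, if_pos htb, hskip] at hk
          obtain rfl : (1 : Int) = k := by simpa using hk
          refine ⟨le_refl 1, ?_, ?_⟩
          · exact (pvQ_cons t b rest 1).mpr (Or.inr (Or.inl ⟨rfl, htb⟩))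
          · intro j hj; exact_mod_cast (pvQ_length hj).1
        · rcases htake : pvBest (PySem.Int.bxor t b) rest with - | s
          · simp [pvBest, hskip, if_neg htb, htake] at hk
          · simp only [pvBest, hskip, if_neg htb, htake] at hk
            obtain rfl : s + 1 = k := by simpa using hk
            obtain ⟨hs1, hsQ, hsMin⟩ := ihT1 s htake
            refine ⟨by omega, ?_, ?_⟩
            · refine (pvQ_cons t b rest (s + 1).toNat).mpr (Or.inr (Or.inr ⟨s.toNat, by omega, hsQ⟩))
            · intro j hj
              rcases (pvQ_cons t b rest j).mp hj with h | ⟨-, htb'⟩ | ⟨k', rfl, hk'⟩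
              · exact absurd h (ihS2 hskip j)
              · exact absurd htb' htb
              · have := hsMin k' hk'; push_cast; omega
      · rcases htake : (if t = b then some (1:Int)
                  else
                    match pvBest (PySem.Int.bxor t b) rest with
                    | none => none
                    | some s => some (s + 1)) with - | c
        · simp only [pvBest, hskip, htake] at hk
          obtain rfl : s0 = k := by simpa using hk
          obtain ⟨hs1, hsQ, hsMin⟩ := ihS1 s0 hskip
          refine ⟨hs1, (pvQ_cons t b rest s0.toNat).mpr (Or.inl hsQ), ?_⟩
          intro j hj
          rcases (pvQ_cons t b rest j).mp hj with h | ⟨-, htb'⟩ | ⟨k', rfl, hk'⟩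
          · exact hsMin j h
          · simp [htb'] at htake
          · rcases h2 : pvBest (PySem.Int.bxor t b) rest with - | s
            · exact absurd hk' (ihT2 h2 k')
            · rw [if_neg] at htake
              · simp [h2] at htake
              · intro htb'; simp [htb'] at htake
        · simp only [pvBest, hskip, htake] at hk
          obtain rfl : min s0 c = k := by simpa using hk
          obtain ⟨hs1, hsQ, hsMin⟩ := ihS1 s0 hskip
          have hcs : 1 ≤ c ∧ pvQ t (b :: rest) c.toNat ∧
              (∀ j : Nat, pvQ t (b :: rest) j → (pvQ t rest j → False) → c ≤ (j : Int)) := by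
            by_cases htb : t = b
            · obtain rfl : c = 1 := by simpa [htb] using htake.symm
              refine ⟨le_refl 1, (pvQ_cons t b rest 1).mpr (Or.inr (Or.inl ⟨rfl, htb⟩)), ?_⟩
              intro j hj _; exact_mod_cast (pvQ_length hj).1
            · rcases h2 : pvBest (PySem.Int.bxor t b) rest with - | s
              · simp [htb, h2] at htake
              · obtain rfl : c = s + 1 := by simpa [htb, h2] using htake.symm
                obtain ⟨h1, hQ, hMin⟩ := ihT1 s h2
                refine ⟨by omega, (pvQ_cons t b rest (s+1).toNat).mpr
                  (Or.inr (Or.inr ⟨s.toNat, by omega, hQ⟩)), ?_⟩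
                intro j hj hnr
                rcases (pvQ_cons t b rest j).mp hj with h | ⟨-, htb'⟩ | ⟨k', rfl, hk'⟩
                · exact absurd h hnr
                · exact absurd htb' htb
                · have := hMin k' hk'; push_cast; omega
          obtain ⟨hc1, hcQ, hcMin⟩ := hcs
          refine ⟨le_min hs1 hc1, ?_, ?_⟩
          · rcases le_total s0 c with h | h
            · rw [min_eq_left h]
              exact (pvQ_cons t b rest s0.toNat).mpr (Or.inl hsQ)
            · rw [min_eq_right h]; exact hcQ
          · intro j hj
            by_cases hr : pvQ t rest j
            · have h1 := hsMin j hr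
              have h2 : min s0 c ≤ s0 := min_le_left _ _
              omega
            · have h1 := hcMin j hj (fun hh => hr hh)
              have h2 : min s0 c ≤ c := min_le_right _ _
              omega
    · intro hk j hq
      rcases hskip : pvBest t rest with - | s0
      · by_cases htb : t = b
        · simp [pvBest, hskip, if_pos htb] at hk
        · rcases htake : pvBest (PySem.Int.bxor t b) rest with - | s
          · rcases (pvQ_cons t b rest j).mp hq with h | ⟨-, htb'⟩ | ⟨k', rfl, hk'⟩
            · exact ihS2 hskip j h
            · exact htb htb'
            · exact ihT2 htake k' hk'
          · simp [pvBest, hskip, if_neg htb, htake] at hk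
      · rcases htake : (if t = b then some (1:Int)
                  else
                    match pvBest (PySem.Int.bxor t b) rest with
                    | none => none
                    | some s => some (s + 1)) with - | c
        · simp [pvBest, hskip, htake] at hk
        · simp [pvBest, hskip, htake] at hk
theorem pvBest_eq_some_of_min (t : Int) (bs : List Int) (j : Nat)
    (h : pvQ t bs (j + 1)) (hmin : ∀ m : Nat, 1 ≤ m → m ≤ j → ¬ pvQ t bs m) :
    pvBest t bs = some ((j : Int) + 1) := by
  rcases hb : pvBest t bs with - | k
  · exact absurd h ((pvBest_char t bs).2 hb (j + 1))
  · obtain ⟨h1, hQ, hMin⟩ := (pvBest_char t bs).1 k hb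
    have hk : k ≤ (j : Int) + 1 := by exact_mod_cast hMin (j + 1) h
    have h2 : ¬ (k.toNat ≤ j) := fun hle => hmin k.toNat (by omega) hle hQ
    have : k = (j : Int) + 1 := by omega
    rw [this]
theorem pvBest_eq_none (t : Int) (bs : List Int) (h : ∀ m : Nat, ¬ pvQ t bs m) :
    pvBest t bs = none := by
  rcases hb : pvBest t bs with - | k
  · rfl
  · obtain ⟨-, hQ, -⟩ := (pvBest_char t bs).1 k hb
    exact absurd hQ (h k.toNat)


theorem pvARow_none_iff (t : Int) (bs : List Int) (val : Int) (idxs : List Int) :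
    pvARow t bs val idxs = none ↔ ∃ i ∈ idxs, PySem.Int.bxor val (PySem.List.pyGetD bs i 0) = t := by
  induction idxs with
  | nil => simp [pvARow]
  | cons i rest ih =>
    simp only [pvARow]
    by_cases h : PySem.Int.bxor val (PySem.List.pyGetD bs i 0) = t
    · simp [h]
    · rcases hr : pvARow t bs val rest with - | l
      · rw [ih] at hr; simp [h, hr]
      · have : ¬ ∃ i ∈ rest, PySem.Int.bxor val (PySem.List.pyGetD bs i 0) = t := by
          rw [← ih, hr]; simp
        simp [h, this]
theorem pvARow_some (t : Int) (bs : List Int) (val : Int) (idxs : List Int)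
    (h : ¬ ∃ i ∈ idxs, PySem.Int.bxor val (PySem.List.pyGetD bs i 0) = t) :
    pvARow t bs val idxs = some (idxs.map (fun i => (PySem.Int.bxor val (PySem.List.pyGetD bs i 0), i + 1))) := by
  induction idxs with
  | nil => simp [pvARow]
  | cons i rest ih =>
    push Not at h
    have h1 : PySem.Int.bxor val (PySem.List.pyGetD bs i 0) ≠ t := h i (List.mem_cons_self ..)
    have h2 := ih (by push Not; exact fun j hj => h j (List.mem_cons_of_mem _ hj))
    simp only [pvARow, if_neg h1, h2, List.map_cons]

def pvHit (t : Int) (bs : List Int) (states : List (Int × Int)) : Prop :=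
  ∃ p ∈ states, ∃ i ∈ PySem.List.pyRange p.2 (bs.length : Int) 1,
    PySem.Int.bxor p.1 (PySem.List.pyGetD bs i 0) = t

def pvExpand (bs : List Int) (states : List (Int × Int)) : List (Int × Int) :=
  states.flatMap (fun p =>
    (PySem.List.pyRange p.2 (bs.length : Int) 1).map
      (fun i => (PySem.Int.bxor p.1 (PySem.List.pyGetD bs i 0), i + 1)))

theorem pvALevel_none_iff (t : Int) (bs : List Int) (states : List (Int × Int)) :
    pvALevel t bs states = none ↔ pvHit t bs states := by
  induction states with
  | nil => simp [pvALevel, pvHit]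
  | cons p rest ih =>
    obtain ⟨val, nextIdx⟩ := p
    rcases hr : pvARow t bs val (PySem.List.pyRange nextIdx (bs.length : Int) 1) with - | l
    · have hex := (pvARow_none_iff t bs val _).mp hr
      simp only [pvALevel, hr]
      constructor
      · intro _
        exact ⟨(val, nextIdx), by simp, hex⟩
      · intro _; trivial
    · have hno : ¬ ∃ i ∈ PySem.List.pyRange nextIdx (bs.length : Int) 1,
          PySem.Int.bxor val (PySem.List.pyGetD bs i 0) = t := by
        rw [← pvARow_none_iff (t := t)]; simp [hr]
      rcases hl : pvALevel t bs rest with - | l'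
      · have hhit := ih.mp hl
        simp only [pvALevel, hr, hl]
        constructor
        · intro _
          obtain ⟨p, hp, hi⟩ := hhit
          exact ⟨p, by simp [hp], hi⟩
        · intro _; trivial
      · have hno2 : ¬ pvHit t bs rest := by rw [← ih, hl]; simp
        simp only [pvALevel, hr, hl]
        constructor
        · intro hh; simp at hh
        · rintro ⟨p, hp, hi⟩
          rcases List.mem_cons.mp hp with rfl | hp'
          · exact absurd hi hno
          · exact absurd ⟨p, hp', hi⟩ hno2
theorem pvALevel_some (t : Int) (bs : List Int) (states : List (Int × Int)) (h : ¬ pvHit t bs states) :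
    pvALevel t bs states = some (pvExpand bs states) := by
  induction states with
  | nil => simp [pvALevel, pvExpand]
  | cons p rest ih =>
    obtain ⟨val, nextIdx⟩ := p
    have h1 : ¬ ∃ i ∈ PySem.List.pyRange nextIdx (bs.length : Int) 1,
        PySem.Int.bxor val (PySem.List.pyGetD bs i 0) = t := by
      intro hh; exact h ⟨(val, nextIdx), List.mem_cons_self .., hh⟩
    have h2 : ¬ pvHit t bs rest := by
      rintro ⟨p, hp, hi⟩; exact h ⟨p, List.mem_cons_of_mem _ hp, hi⟩
    simp only [pvALevel, pvARow_some t bs val _ h1, ih h2, pvExpand, List.flatMap_cons]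
def pvGood (bs : List Int) (j : Nat) (p : Int × Int) : Prop :=
  ∃ (nn : Nat) (S : List Int), p.2 = (nn : Int) ∧ nn ≤ bs.length ∧
    S.Sublist (bs.take nn) ∧ S.length = j ∧ pvXorL S = p.1

def pvInv (bs : List Int) (j : Nat) (states : List (Int × Int)) : Prop :=
  (∀ p ∈ states, pvGood bs j p) ∧
  (∀ (S : List Int) (m : Nat), S.Sublist (bs.take m) → m ≤ bs.length → S.length = j →
    ∃ ni : Nat, ni ≤ m ∧ (pvXorL S, (ni : Int)) ∈ states)

theorem pvSublist_concat_decomp {x : Int} :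
    ∀ {l S : List Int}, (S ++ [x]).Sublist l →
      ∃ i : Nat, i < l.length ∧ l[i]? = some x ∧ S.Sublist (l.take i) := by
  intro l
  induction l with
  | nil => intro S h; simp at h
  | cons a l ih =>
    intro S h
    rcases List.sublist_cons_iff.mp h with h' | ⟨r, heq, hr⟩
    · obtain ⟨i, hi, hx, hS⟩ := ih h'
      exact ⟨i + 1, by simpa using hi, by simpa using hx,
        by rw [List.take_succ_cons]; exact hS.cons a⟩
    · cases S with
      | nil =>
        simp only [List.nil_append, List.cons.injEq] at heq
        obtain ⟨rfl, rfl⟩ := heq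
        exact ⟨0, by simp, by simp, by simp⟩
      | cons s S' =>
        simp only [List.cons_append, List.cons.injEq] at heq
        obtain ⟨rfl, rfl⟩ := heq
        obtain ⟨i, hi, hx, hS⟩ := ih hr
        exact ⟨i + 1, by simpa using hi, by simpa using hx,
          by rw [List.take_succ_cons]; exact hS.cons₂ s⟩

theorem pvTake_mono_sublist (bs : List Int) {a b : Nat} (h : a ≤ b) :
    (bs.take a).Sublist (bs.take b) := by
  have : bs.take a = (bs.take b).take a := by
    rw [List.take_take, Nat.min_eq_left h]
  rw [this]
  exact List.take_sublist _ _

theorem pvTake_concat (bs : List Int) {i : Nat} (h : i < bs.length) :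
    bs.take (i + 1) = bs.take i ++ [bs[i]] := by
  rw [List.take_add_one, List.getElem?_eq_getElem h]
  rfl

theorem pvInv_step (bs : List Int) (j : Nat) (states : List (Int × Int))
    (h : pvInv bs j states) : pvInv bs (j + 1) (pvExpand bs states) := by
  obtain ⟨hsnd, hcmp⟩ := h
  constructor
  · intro p' hp'
    rw [pvExpand, List.mem_flatMap] at hp'
    obtain ⟨p, hp, hp'mem⟩ := hp'
    rw [List.mem_map] at hp'mem
    obtain ⟨i, hi, rfl⟩ := hp'mem
    rw [PySem.List.mem_pyRange_one] at hi
    obtain ⟨nn, S, hp2, hnn, hS, hlen, hxor⟩ := hsnd p hp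
    have hi0 : 0 ≤ i := le_trans (by omega) hi.1
    set ii := i.toNat with hii
    have hiv : i = (ii : Int) := by omega
    have hilt : ii < bs.length := by omega
    refine ⟨ii + 1, S ++ [bs[ii]], by simp [hiv], by omega, ?_, by simp [hlen], ?_⟩
    · rw [pvTake_concat bs hilt]
      exact List.Sublist.append (hS.trans (pvTake_mono_sublist bs (by omega))) (by simp)
    · rw [pvXorL_concat, hxor]
      congr 1
      rw [hiv, PySem.List.pyGetD_natCast, List.getD_eq_getElem bs 0 hilt]
  · intro S' m hsub hm hlen
    obtain ⟨S, x, rfl⟩ : ∃ S x, S' = S ++ [x] := by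
      rcases List.eq_nil_or_concat S' with rfl | ⟨S, x, rfl⟩
      · simp at hlen
      · exact ⟨S, x, by simp⟩
    obtain ⟨i, hi, hx, hS⟩ := pvSublist_concat_decomp hsub
    rw [List.length_take] at hi
    have hilt : i < bs.length := by omega
    have him : i < m := by omega
    have hgx : bs[i] = x := by
      have h2 : bs[i]? = some x := by
        rw [← List.getElem?_take_of_lt (l := bs) (him)]
        exact hx
      rw [List.getElem?_eq_getElem hilt] at h2
      simpa using h2
    have hS' : S.Sublist (bs.take i) := by
      have : (bs.take m).take i = bs.take i := by
        rw [List.take_take, Nat.min_eq_left (by omega)]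
      rwa [this] at hS
    obtain ⟨ni, hni, hmem⟩ := hcmp S i hS' (by omega) (by simpa using hlen)
    refine ⟨i + 1, by omega, ?_⟩
    rw [pvExpand, List.mem_flatMap]
    refine ⟨(pvXorL S, (ni : Int)), hmem, ?_⟩
    rw [List.mem_map]
    refine ⟨(i : Int), ?_, ?_⟩
    · rw [PySem.List.mem_pyRange_one]
      refine ⟨?_, ?_⟩
      · show (ni : Int) ≤ (i : Int)
        exact_mod_cast hni
      · show (i : Int) < (bs.length : Int)
        exact_mod_cast hilt
    · rw [pvXorL_concat]
      simp only [PySem.List.pyGetD_natCast, List.getD_eq_getElem bs 0 hilt, hgx]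
      simp
theorem pvSublist_take_of_concat {S : List Int} {x : Int} {bs : List Int}
    (h : (S ++ [x]).Sublist bs) :
    ∃ i : Nat, i < bs.length ∧ bs[i]? = some x ∧ S.Sublist (bs.take i) :=
  pvSublist_concat_decomp h

theorem pvHit_iff (t : Int) (bs : List Int) (j : Nat) (states : List (Int × Int))
    (h : pvInv bs j states) : pvHit t bs states ↔ pvQ t bs (j + 1) := by
  obtain ⟨hsnd, hcmp⟩ := h
  constructor
  · rintro ⟨p, hp, i, hi, hxor⟩
    rw [PySem.List.mem_pyRange_one] at hi
    obtain ⟨nn, S, hp2, hnn, hS, hlen, hx⟩ := hsnd p hp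
    rw [hp2] at hi
    have hi0 : 0 ≤ i := le_trans (by omega) hi.1
    have hilt : i.toNat < bs.length := by omega
    have hiv : i = (i.toNat : Int) := by omega
    refine ⟨S ++ [bs[i.toNat]], ?_, by simp, by simp [hlen], ?_⟩
    · have h1 : (S ++ [bs[i.toNat]]).Sublist (bs.take (i.toNat + 1)) := by
        rw [pvTake_concat bs hilt]
        exact List.Sublist.append (hS.trans (pvTake_mono_sublist bs (by omega))) (by simp)
      exact h1.trans (List.take_sublist _ _)
    · rw [pvXorL_concat, hx, ← hxor]
      congr 1
      rw [PySem.List.pyGetD_eq_getElem bs 0 hi0 hi.2]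
  · rintro ⟨S', hsub, hne, hlen, hx⟩
    obtain ⟨S, x, rfl⟩ : ∃ S x, S' = S ++ [x] := by
      rcases List.eq_nil_or_concat S' with rfl | ⟨S, x, rfl⟩
      · exact absurd rfl hne
      · exact ⟨S, x, by simp⟩
    obtain ⟨i, hi, hxi, hS⟩ := pvSublist_take_of_concat hsub
    obtain ⟨ni, hni, hmem⟩ := hcmp S i hS (by omega) (by simpa using hlen)
    refine ⟨(pvXorL S, (ni : Int)), hmem, (i : Int), ?_, ?_⟩
    · rw [PySem.List.mem_pyRange_one]
      refine ⟨?_, ?_⟩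
      · show (ni : Int) ≤ (i : Int)
        exact_mod_cast hni
      · show (i : Int) < (bs.length : Int)
        exact_mod_cast hi
    · show PySem.Int.bxor (pvXorL S) (PySem.List.pyGetD bs (i : Int) 0) = t
      rw [PySem.List.pyGetD_natCast, List.getD_eq_getElem bs 0 hi]
      rw [List.getElem?_eq_getElem hi] at hxi
      have hgx : bs[i] = x := by simpa using hxi
      rw [hgx, ← pvXorL_concat, hx]


theorem pvALoop_eq (t : Int) (bs : List Int) :
    ∀ (k j : Nat) (states : List (Int × Int)), k + j = bs.length → pvInv bs j states →
    (∀ m : Nat, 1 ≤ m → m ≤ j → ¬ pvQ t bs m) →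
    pvALoop t bs k ((j : Int) + 1) states = pvBest t bs := by
  intro k
  induction k with
  | zero =>
    intro j states hkj hinv hmin
    have hnone : ∀ m : Nat, ¬ pvQ t bs m := by
      intro m hq
      obtain ⟨h1, h2⟩ := pvQ_length hq
      exact hmin m h1 (by omega) hq
    rw [pvBest_eq_none t bs hnone]
    rfl
  | succ k ih =>
    intro j states hkj hinv hmin
    by_cases hh : pvHit t bs states
    · have h1 := (pvALevel_none_iff t bs states).mpr hh
      have h2 := (pvHit_iff t bs j states hinv).mp hh
      rw [pvBest_eq_some_of_min t bs j h2 hmin]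
      simp only [pvALoop, h1]
    · have h1 : pvALevel t bs states = some (pvExpand bs states) := pvALevel_some t bs states hh
      have h2 : ¬ pvQ t bs (j + 1) := fun hq => hh ((pvHit_iff t bs j states hinv).mpr hq)
      have hmin' : ∀ m : Nat, 1 ≤ m → m ≤ j + 1 → ¬ pvQ t bs m := by
        intro m hm1 hm2 hq
        rcases Nat.lt_or_ge m (j + 1) with hlt | hge
        · exact hmin m hm1 (by omega) hq
        · have : m = j + 1 := by omega
          rw [this] at hq
          exact h2 hq
      have := ih (j + 1) (pvExpand bs states) (by omega) (pvInv_step bs j states hinv) hmin'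
      simp only [pvALoop, h1]
      have hc : ((j : Int) + 1) + 1 = (((j + 1 : Nat)) : Int) + 1 := by push_cast; ring
      rw [hc]
      exact this

-- ===== VERDICT (by name: the statement is the Claim_ definition above) =====
theorem min_ops_part1_spec : Claim_equal_min_ops_part1 := by
  intro target buttons _
  unfold Spec_min_ops_part1 min_ops_part1 min_ops_part1_alt
  have hinv : pvInv buttons 0 [(0, 0)] := by
    constructor
    · rintro p hp
      simp only [List.mem_singleton] at hp
      exact ⟨0, [], by simp [hp], by simp, by simp, rfl, by simp [hp, pvXorL]⟩
    · intro S m hS hm hlen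
      have : S = [] := List.eq_nil_of_length_eq_zero hlen
      subst this
      exact ⟨0, Nat.zero_le m, by simp [pvXorL]⟩
  have := pvALoop_eq target buttons buttons.length 0 [(0, 0)] (by omega) hinv (by omega)
  simpa using this
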